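-- pv_equiv track=rewrite | github.com/ttran428/advent-code-2022 | aoc/day6.py | start_marker
-- ===== SOURCE A (Python) =====
-- def start_marker(buffer: str, distinct_count: int) -> int:
--     window = []
--
--     i = 0
--     while i < len(buffer):
--         next_letter = buffer[i]
--         if next_letter in window:
--             for _ in range(len(window)):
--                 window_letter = window.pop(0)
--                 if window_letter == next_letter:
--                     window.append(next_letter)
--                     break
--         else:
--             if len(window) == distinct_count - 1:
--                 return i  + 1
--
--             else:
--                 window.append(next_letter)
--
--         i += 1
--     return 0
-- ===== SOURCE B (Python) =====
-- def start_marker(buffer: str, distinct_count: int) -> int: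
--     last = {}
--     start = 0
--     for i, c in enumerate(buffer):
--         if c in last and last[c] >= start:
--             start = last[c] + 1
--         last[c] = i
--         if i - start + 1 == distinct_count:
--             return i + 1
--     return 0
-- ===== Notes on version B (the rewrite author's own statement) =====
-- stated objective: faster
-- what changed: Replaces the explicit window list with O(k) membership test and pop-from-front rotation by a one-pass sliding window using a last-seen-index dictionary and a start pointer.
import Mathlib
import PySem

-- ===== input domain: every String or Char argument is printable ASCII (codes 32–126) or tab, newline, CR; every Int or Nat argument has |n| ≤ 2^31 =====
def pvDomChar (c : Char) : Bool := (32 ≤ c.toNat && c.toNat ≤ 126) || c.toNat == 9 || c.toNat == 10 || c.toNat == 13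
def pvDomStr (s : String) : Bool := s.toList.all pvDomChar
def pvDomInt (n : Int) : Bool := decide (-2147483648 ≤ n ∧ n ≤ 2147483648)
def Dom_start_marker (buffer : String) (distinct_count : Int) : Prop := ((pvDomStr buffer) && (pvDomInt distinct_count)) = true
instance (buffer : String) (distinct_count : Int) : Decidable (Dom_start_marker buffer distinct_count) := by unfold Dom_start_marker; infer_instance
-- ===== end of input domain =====

-- B replaces A's explicit window list (membership test and pop-from-front rotation per character)
-- by a one-pass sliding window with a last-seen-index dictionary and a start pointer.

-- ===== PORT A =====
-- inner 'for _ in range(len(window)): window_letter = window.pop(0); if == next: append; break'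
-- (fuel = len(window); the branch for the empty list is unreachable since fuel ≤ length)
def pvInnerA (c : Char) : Nat → List Char → List Char
  | 0, w => w
  | _ + 1, [] => []
  | n + 1, x :: rest => if x = c then rest ++ [c] else pvInnerA c n rest

-- the while-loop over buffer[i], carrying i and window
def pvLoopA (k : Int) : List Char → Int → List Char → Int
  | [], _, _ => 0
  | c :: rest, i, window =>
    if c ∈ window then
      pvLoopA k rest (i + 1) (pvInnerA c window.length window)
    else if (window.length : Int) = k - 1 then i + 1
    else pvLoopA k rest (i + 1) (window ++ [c])

def start_marker (buffer : String) (distinct_count : Int) : Int :=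
  pvLoopA distinct_count buffer.toList 0 []

-- ===== PORT B =====
-- 'if c in last and last[c] >= start: start = last[c] + 1'
def pvNewStart (start : Int) : Option Int → Int
  | some j => if start ≤ j then j + 1 else start
  | none => start

-- 'for i, c in enumerate(buffer)' carrying start and the last-seen dict
def pvLoopB (k : Int) : List Char → Int → Int → PySem.Dict Char Int → Int
  | [], _, _, _ => 0
  | c :: rest, i, start, last =>
    if i - pvNewStart start (last.get? c) + 1 = k then i + 1
    else pvLoopB k rest (i + 1) (pvNewStart start (last.get? c)) (last.insert c i)

def start_marker_alt (buffer : String) (distinct_count : Int) : Int :=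
  pvLoopB distinct_count buffer.toList 0 0 PySem.Dict.empty

-- ===== PRECONDITION & SPEC =====
def Spec_start_marker (buffer : String) (distinct_count : Int) (out : Int) : Prop := out = start_marker_alt buffer distinct_count
instance (buffer : String) (distinct_count : Int) (out : Int) : Decidable (Spec_start_marker buffer distinct_count out) := by unfold Spec_start_marker; infer_instance

-- ===== CLAIM (what is proved, stated in full; the proofs are below) =====
def Claim_equal_start_marker : Prop := ∀ (buffer : String) (distinct_count : Int), Dom_start_marker buffer distinct_count → Spec_start_marker buffer distinct_count (start_marker buffer distinct_count)

-- ===== LEMMAS AND PROOFS =====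

-- Invariant tying A's window list to B's (start, last-seen dict) state:
-- the window is the distinct run buffer[start..i-1]; the dict records, for each char in the
-- window, its position start + (offset in window), and positions < start for all other chars.
def pvInv (k i start : Int) (last : PySem.Dict Char Int) (window : List Char) : Prop :=
  window.Nodup ∧ 0 ≤ start ∧ start + window.length = i ∧
  ((1 : Int) ≤ k → (window.length : Int) ≤ k - 1) ∧
  (∀ c ∈ window, ∃ u v, window = u ++ c :: v ∧ last.get? c = some (start + u.length)) ∧
  (∀ c j, last.get? c = some j → c ∉ window → j < start)

lemma pv_split_nodup {α : Type} {u v : List α} {d : α} (h : (u ++ d :: v).Nodup) :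
    d ∉ u ∧ d ∉ v ∧ v.Nodup := by
  simp [List.nodup_append] at h
  exact ⟨fun hm => (h.2.2 d hm).1 rfl, h.2.1.1, h.2.1.2⟩

lemma pvInnerA_spec (c : Char) (v : List Char) :
    ∀ u : List Char, c ∉ u → pvInnerA c (u ++ c :: v).length (u ++ c :: v) = v ++ [c] := by
  intro u
  induction u with
  | nil => intro _; simp [pvInnerA]
  | cons a u ih =>
    intro h
    have hac : a ≠ c := fun he => h (he ▸ List.mem_cons_self)
    have hcu : c ∉ u := fun hm => h (List.mem_cons_of_mem _ hm)
    show pvInnerA c ((u ++ c :: v).length + 1) (a :: (u ++ c :: v)) = v ++ [c]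
    rw [pvInnerA, if_neg hac, ih hcu]

lemma pv_split_unique {α : Type} (d : α) :
    ∀ (u1 u2 v1 v2 : List α), d ∉ u1 → d ∉ u2 →
      u1 ++ d :: v1 = u2 ++ d :: v2 → u1 = u2 ∧ v1 = v2 := by
  intro u1
  induction u1 with
  | nil =>
    intro u2 v1 v2 _ h2 he
    cases u2 with
    | nil => simpa using he
    | cons b u2 =>
      simp at he
      exact absurd (he.1 ▸ List.mem_cons_self) h2
  | cons a u1 ih =>
    intro u2 v1 v2 h1 h2 he
    cases u2 with
    | nil =>
      simp at he
      exact absurd (he.1 ▸ List.mem_cons_self) h1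
    | cons b u2 =>
      simp at he
      have h1' : d ∉ u1 := fun h => h1 (List.mem_cons_of_mem _ h)
      have h2' : d ∉ u2 := fun h => h2 (List.mem_cons_of_mem _ h)
      obtain ⟨hu, hv⟩ := ih u2 v1 v2 h1' h2' he.2
      exact ⟨by simp [he.1, hu], hv⟩

lemma pvLoop_eq (k : Int) :
    ∀ (rest : List Char) (i start : Int) (last : PySem.Dict Char Int) (window : List Char),
      pvInv k i start last window →
      pvLoopA k rest i window = pvLoopB k rest i start last := by
  intro rest
  induction rest with
  | nil => intro i start last window _; simp [pvLoopA, pvLoopB]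
  | cons c rest ih =>
    intro i start last window hinv
    obtain ⟨hnd, hs0, hlen, hbnd, hin, hout⟩ := hinv
    by_cases hc : c ∈ window
    · -- duplicate: A rotates the window, B advances start past the last occurrence of c
      obtain ⟨u, v, hw, hget⟩ := hin c hc
      obtain ⟨hcu, hcv, hvnd⟩ := pv_split_nodup (hw ▸ hnd)
      have hinner : pvInnerA c window.length window = v ++ [c] := by
        rw [hw]; exact pvInnerA_spec c v u hcu
      have hstart' : pvNewStart start (last.get? c) = start + u.length + 1 := by
        rw [hget]
        have hle : start ≤ start + (u.length : Int) := by omega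
        simp [pvNewStart, hle]
      have hwl : (window.length : Int) = u.length + v.length + 1 := by
        rw [hw]; simp; ring
      have hnoret : ¬ (i - (start + u.length + 1) + 1 = k) := by
        intro hk
        by_cases h1 : (1 : Int) ≤ k
        · have := hbnd h1; omega
        · omega
      have hA : pvLoopA k (c :: rest) i window
          = pvLoopA k rest (i + 1) (v ++ [c]) := by
        rw [pvLoopA, if_pos hc, hinner]
      have hB : pvLoopB k (c :: rest) i start last
          = pvLoopB k rest (i + 1) (start + u.length + 1) (last.insert c i) := by
        rw [pvLoopB, hstart', if_neg hnoret]
      rw [hA, hB]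
      apply ih
      refine ⟨?_, by omega, by simp; omega,
        fun h1 => by have := hbnd h1; simp; omega, ?_, ?_⟩
      · -- Nodup (v ++ [c])
        exact List.nodup_append.mpr ⟨hvnd, List.nodup_singleton c,
          by intro a ha b hb he; rw [List.mem_singleton.mp hb] at he; exact hcv (he ▸ ha)⟩
      · intro d hd
        rcases List.mem_append.mp hd with hdv | hdc
        · -- d ∈ v keeps its recorded position
          have hdc' : d ≠ c := fun h => hcv (h ▸ hdv)
          obtain ⟨p, q, hv⟩ := List.append_of_mem hdv
          obtain ⟨u1, v1, hw1, hget1⟩ := hin d (by rw [hw]; simp [hv])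
          have hdu1 : d ∉ u1 := (pv_split_nodup (hw1 ▸ hnd)).1
          have hw2 : window = (u ++ c :: p) ++ d :: q := by rw [hw, hv]; simp
          have hdu2 : d ∉ u ++ c :: p := (pv_split_nodup (hw2 ▸ hnd)).1
          obtain ⟨he, _⟩ := pv_split_unique d u1 (u ++ c :: p) v1 q hdu1 hdu2 (hw1 ▸ hw2)
          refine ⟨p, q ++ [c], by rw [hv]; simp, ?_⟩
          rw [PySem.Dict.get?_insert, if_neg hdc', hget1, he]
          congr 1
          simp; ring
        · -- d = c, freshly reinserted at the end
          have hdc : d = c := by simpa using hdc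
          subst hdc
          refine ⟨v, [], by simp, ?_⟩
          rw [PySem.Dict.get?_insert_self]
          congr 1; omega
      · intro d j hj hd
        by_cases hdc : d = c
        · exact absurd (by simp [hdc]) hd
        · rw [PySem.Dict.get?_insert, if_neg hdc] at hj
          by_cases hdw : d ∈ window
          · -- d was in the discarded prefix u
            have hdu : d ∈ u := by
              rcases List.mem_append.mp (hw ▸ hdw) with h | h
              · exact h
              · rcases List.mem_cons.mp h with h | h
                · exact absurd h hdc
                · exact absurd (List.mem_append.mpr (Or.inl h)) hd
            obtain ⟨p, q, hu⟩ := List.append_of_mem hdu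
            obtain ⟨u1, v1, hw1, hget1⟩ := hin d hdw
            have hdu1 : d ∉ u1 := (pv_split_nodup (hw1 ▸ hnd)).1
            have hw2 : window = p ++ d :: (q ++ c :: v) := by rw [hw, hu]; simp
            have hdu2 : d ∉ p := (pv_split_nodup (hw2 ▸ hnd)).1
            obtain ⟨he, _⟩ := pv_split_unique d u1 p v1 (q ++ c :: v) hdu1 hdu2 (hw1 ▸ hw2)
            rw [hget1, he] at hj
            have hj' : j = start + (p.length : Int) := by exact_mod_cast Option.some.inj hj.symm
            have hpu : (p.length : Int) < u.length := by
              have : u.length = p.length + q.length + 1 := by rw [hu]; simp only [List.length_append, List.length_cons]; omega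
              omega
            omega
          · have := hout d j hj hdw; omega
    · -- fresh character: A appends (or returns), B keeps start (or returns)
      have hstart' : pvNewStart start (last.get? c) = start := by
        cases hgc : last.get? c with
        | none => rfl
        | some j =>
          have := hout c j hgc hc
          simp [pvNewStart]; omega
      by_cases hret : (window.length : Int) = k - 1
      · rw [pvLoopA, if_neg hc, if_pos hret, pvLoopB, hstart', if_pos (by omega)]
      · have hA : pvLoopA k (c :: rest) i window
            = pvLoopA k rest (i + 1) (window ++ [c]) := by
          rw [pvLoopA, if_neg hc, if_neg hret]
        have hB : pvLoopB k (c :: rest) i start last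
            = pvLoopB k rest (i + 1) start (last.insert c i) := by
          rw [pvLoopB, hstart', if_neg (by omega)]
        rw [hA, hB]
        apply ih
        refine ⟨List.nodup_append.mpr ⟨hnd, List.nodup_singleton c,
          by intro a ha b hb he; rw [List.mem_singleton.mp hb] at he; exact hc (he ▸ ha)⟩, hs0, by simp; omega,
          fun h1 => by have := hbnd h1; simp; omega, ?_, ?_⟩
        · intro d hd
          rcases List.mem_append.mp hd with hdw | hdc
          · have hdc' : d ≠ c := fun h => hc (h ▸ hdw)
            obtain ⟨u1, v1, hw1, hget1⟩ := hin d hdw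
            exact ⟨u1, v1 ++ [c], by rw [hw1]; simp,
              by rw [PySem.Dict.get?_insert, if_neg hdc', hget1]⟩
          · have hdc : d = c := by simpa using hdc
            subst hdc
            exact ⟨window, [], by simp, by rw [PySem.Dict.get?_insert_self]; congr 1; omega⟩
        · intro d j hj hd
          have hdc : d ≠ c := fun h => hd (h ▸ List.mem_append.mpr (Or.inr (by simp)))
          rw [PySem.Dict.get?_insert, if_neg hdc] at hj
          exact hout d j hj (fun h => hd (List.mem_append.mpr (Or.inl h)))

-- ===== VERDICT (by name: the statement is the Claim_ definition above) =====
theorem start_marker_spec : Claim_equal_start_marker := by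
  intro buffer k _
  show start_marker buffer k = start_marker_alt buffer k
  unfold start_marker start_marker_alt
  apply pvLoop_eq
  refine ⟨List.nodup_nil, le_refl 0, by simp, by intro h; simp; omega, ?_, ?_⟩
  · intro c hc; simp at hc
  · intro c j hj; rw [PySem.Dict.get?_empty] at hj; cases hj
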